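-- pv_equiv track=rewrite | github.com/kobeomseok95/codingTest | programmers/level4/42894_2.py | remove_check
-- ===== SOURCE A (Python) =====
-- def remove_check(n, board, y, x, height, weight):
--     if y + height > n or x + weight > n:
--         return False
--
--     black = 0
--     before_block = -1
--     for i in range(y, y + height):
--         for j in range(x, x + weight):
--             if board[i][j] == 0:
--                 if not top_check(i, j, board):
--                     return False
--                 black += 1
--                 if black > 2:
--                     return False
--             else:
--                 if other_block_check(before_block, board[i][j]):
--                     return False
--                 before_block = board[i][j]
--
--     return True
--
-- def top_check(y, x, board):
--     for i in range(y):
--         if board[i][x] != 0: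
--             return False
--     return True
--
-- def other_block_check(before_block, block):
--     return False if before_block == -1 or before_block == block else True
-- ===== SOURCE B (Python) =====
-- def remove_check(n, board, y, x, height, weight):
--     if y + height > n or x + weight > n:
--         return False
--     black = 0
--     value = None
--     for j in range(x, x + weight):
--         seen = False
--         for k in range(y + height):
--             v = board[k][j]
--             if k >= y:
--                 if v == 0:
--                     if seen:
--                         return False
--                     black += 1
--                 elif value is None:
--                     value = v
--                 elif value != v:
--                     return False
--             if v != 0:
--                 seen = True
--     return black <= 2
-- ===== Notes on version B (the rewrite author's own statement) =====
-- stated objective: alternative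
-- what changed: B replaces A's row-major region scan that re-walks the column above every black cell (top_check) and tracks a -1 sentinel by a column-major sweep: each column is walked once from row 0 with a 'seen a nonzero above' flag, so the repeated upward scans disappear and the single-block check threads an Optional value instead of a sentinel.
-- outside the precondition, e.g. on remove_check(3, [[0, 0, 0], [1]], 0, 0, 2, 3): A returns False, B raises IndexError; on remove_check(2, [[-1, 7], [0, 0]], 0, 0, 1, 2): A returns True, B returns False; on remove_check(2, [[0, 0], [0, 0]], -2, 0, 2, 2): A returns False, B returns True
import Mathlib
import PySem

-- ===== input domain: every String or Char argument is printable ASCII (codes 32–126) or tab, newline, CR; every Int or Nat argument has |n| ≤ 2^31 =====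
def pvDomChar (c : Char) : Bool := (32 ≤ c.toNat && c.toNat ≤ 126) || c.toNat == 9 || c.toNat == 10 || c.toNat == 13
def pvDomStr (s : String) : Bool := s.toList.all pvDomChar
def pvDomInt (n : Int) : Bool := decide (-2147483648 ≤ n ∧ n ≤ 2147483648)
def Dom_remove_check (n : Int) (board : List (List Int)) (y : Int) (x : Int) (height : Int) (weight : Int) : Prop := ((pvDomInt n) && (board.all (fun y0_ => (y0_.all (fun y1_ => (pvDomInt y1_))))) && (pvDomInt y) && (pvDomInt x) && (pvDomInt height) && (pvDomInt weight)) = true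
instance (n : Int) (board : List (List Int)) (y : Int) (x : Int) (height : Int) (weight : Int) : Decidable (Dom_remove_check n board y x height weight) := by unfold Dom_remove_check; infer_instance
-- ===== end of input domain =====

-- B replaces A's row-major scan (which re-walks the column above every black cell via top_check and
-- tracks a -1 sentinel) by a column-major sweep with a per-column "seen a nonzero above" flag and an
-- Optional block value (objective: alternative; same result on Pre_).


-- `board[i][j]` with Python indexing; the `.getD` defaults are only reached outside Pre_.
def pvCell (board : List (List Int)) (i j : Int) : Int :=
  (PySem.List.pyGet? ((PySem.List.pyGet? board i).getD []) j).getD 0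

-- ===== PORT A =====
def top_check (y x : Int) (board : List (List Int)) : Bool :=
  (PySem.List.pyRange 0 y 1).all (fun i => pvCell board i x == 0)

def other_block_check (before_block block : Int) : Bool :=
  if before_block == -1 || before_block == block then false else true

def remove_check_go (board : List (List Int)) (cells : List (Int × Int)) (black : Int) (before : Int) : Bool :=
  match cells with
  | [] => true
  | (i, j) :: rest =>
    if pvCell board i j == 0 then
      if !(top_check i j board) then false
      else if black + 1 > 2 then false
      else remove_check_go board rest (black + 1) before
    else
      if other_block_check before (pvCell board i j) then false
      else remove_check_go board rest black (pvCell board i j)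

def remove_check (n : Int) (board : List (List Int)) (y : Int) (x : Int) (height : Int) (weight : Int) : Bool :=
  if y + height > n || x + weight > n then false
  else
    remove_check_go board
      ((PySem.List.pyRange y (y + height) 1).flatMap
        (fun i => (PySem.List.pyRange x (x + weight) 1).map (fun j => (i, j))))
      0 (-1)

-- ===== PORT B =====
-- one column j: walk rows 0..y+height-1 once, `seen` = a nonzero appeared above the current row
def bcol (board : List (List Int)) (y j : Int) : List Int → Bool → Int → Option Int → Option (Int × Option Int)
  | [], _, black, value => some (black, value)
  | k :: ks, seen, black, value =>
    let v := pvCell board k j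
    let step : Option (Int × Option Int) :=
      if y ≤ k then
        if v == 0 then
          if seen then none else some (black + 1, value)
        else
          match value with
          | none => some (black, some v)
          | some b => if b == v then some (black, value) else none
      else some (black, value)
    match step with
    | none => none
    | some (black', value') => bcol board y j ks (seen || (v != 0)) black' value'

def bcols (board : List (List Int)) (y h : Int) : List Int → Int → Option Int → Option (Int × Option Int)
  | [], black, value => some (black, value)
  | j :: js, black, value =>
    match bcol board y j (PySem.List.pyRange 0 (y + h) 1) false black value with
    | none => none
    | some (black', value') => bcols board y h js black' value'

def remove_check_alt (n : Int) (board : List (List Int)) (y : Int) (x : Int) (height : Int) (weight : Int) : Bool :=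
  if y + height > n || x + weight > n then false
  else
    match bcols board y height (PySem.List.pyRange x (x + weight) 1) 0 none with
    | none => false
    | some (black, _) => decide (black ≤ 2)

-- ===== PRECONDITION & SPEC =====
-- Pre_ restricts to the puzzle's natural domain and excludes (conservatively, over the whole board)
-- inputs on which one of the two scan orders would hit an invalid Python index (IndexError, except
-- when A's early exit happens to precede the bad access), regions containing the value -1 (collides
-- with A's internal sentinel; block ids are non-negative in the puzzle), and negative y or x
-- (Python's negative-index wraparound, outside the natural domain of board coordinates).
def Pre_remove_check (n : Int) (board : List (List Int)) (y : Int) (x : Int) (height : Int) (weight : Int) : Prop :=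
  (y + height ≤ n ∧ x + weight ≤ n ∧ 0 < weight) →
    ((0 < height → 0 ≤ y ∧ 0 ≤ x ∧
        ∀ i ∈ PySem.List.pyRange y (y + height) 1, ∀ j ∈ PySem.List.pyRange x (x + weight) 1,
          pvCell board i j ≠ -1) ∧
     (0 < y + height → 0 ≤ x ∧ y + height ≤ (board.length : Int) ∧
        ∀ row ∈ board, x + weight ≤ (row.length : Int)))
instance (n : Int) (board : List (List Int)) (y : Int) (x : Int) (height : Int) (weight : Int) : Decidable (Pre_remove_check n board y x height weight) := by unfold Pre_remove_check; infer_instance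

def pvWitness_remove_check : Int × List (List Int) × Int × Int × Int × Int :=
  (2, [[0, 0], [1, 1]], 0, 0, 2, 2)

def Spec_remove_check (n : Int) (board : List (List Int)) (y : Int) (x : Int) (height : Int) (weight : Int) (out : Bool) : Prop := out = remove_check_alt n board y x height weight
instance (n : Int) (board : List (List Int)) (y : Int) (x : Int) (height : Int) (weight : Int) (out : Bool) : Decidable (Spec_remove_check n board y x height weight out) := by unfold Spec_remove_check; infer_instance

-- ===== CLAIM (what is proved, stated in full; the proofs are below) =====
def Claim_equal_remove_check : Prop := ∀ (n : Int) (board : List (List Int)) (y : Int) (x : Int) (height : Int) (weight : Int), Dom_remove_check n board y x height weight → Pre_remove_check n board y x height weight → Spec_remove_check n board y x height weight (remove_check n board y x height weight)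

-- ===== LEMMAS AND PROOFS =====

-- A-side abstractions over the row-major cell list
def pvZC (board : List (List Int)) (ps : List (Int × Int)) : Nat :=
  (ps.filter (fun p => pvCell board p.1 p.2 == 0)).length
def pvTops (board : List (List Int)) (ps : List (Int × Int)) : Bool :=
  (ps.filter (fun p => pvCell board p.1 p.2 == 0)).all
    (fun p => (PySem.List.pyRange 0 p.1 1).all (fun k => pvCell board k p.2 == 0))
def pvNZ (board : List (List Int)) (ps : List (Int × Int)) : List Int :=
  (ps.filter (fun p => pvCell board p.1 p.2 != 0)).map (fun p => pvCell board p.1 p.2)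
def pvChain (b : Int) (vs : List Int) : Bool :=
  match vs with
  | [] => true
  | v :: t => (b == -1 || b == v) && pvChain v t

-- B-side abstractions over one column's scanned row list
def pvCzc (board : List (List Int)) (y j : Int) (ks : List Int) : Nat :=
  (ks.filter (fun k => decide (y ≤ k) && (pvCell board k j == 0))).length
def pvCvals (board : List (List Int)) (y j : Int) (ks : List Int) : List Int :=
  (ks.filter (fun k => decide (y ≤ k) && (pvCell board k j != 0))).map (fun k => pvCell board k j)
def pvCok (board : List (List Int)) (y j : Int) (seen : Bool) : List Int → Bool
  | [] => true
  | k :: ks =>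
    (if y ≤ k ∧ pvCell board k j = 0 then !seen else true)
      && pvCok board y j (seen || (pvCell board k j != 0)) ks
def pvRun : Option Int → List Int → Option (Option Int)
  | v, [] => some v
  | none, a :: t => pvRun (some a) t
  | some b, a :: t => if b == a then pvRun (some b) t else none

lemma pvZC_cons_zero (board : List (List Int)) (i j : Int) (rest : List (Int × Int))
    (hv : pvCell board i j = 0) : pvZC board ((i, j) :: rest) = pvZC board rest + 1 := by
  simp [pvZC, hv]

lemma pvZC_cons_nz (board : List (List Int)) (i j : Int) (rest : List (Int × Int))
    (hv : ¬ pvCell board i j = 0) : pvZC board ((i, j) :: rest) = pvZC board rest := by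
  simp [pvZC, hv]

lemma pvTops_cons_zero (board : List (List Int)) (i j : Int) (rest : List (Int × Int))
    (hv : pvCell board i j = 0) :
    pvTops board ((i, j) :: rest) = (top_check i j board && pvTops board rest) := by
  simp [pvTops, top_check, hv]

lemma pvTops_cons_nz (board : List (List Int)) (i j : Int) (rest : List (Int × Int))
    (hv : ¬ pvCell board i j = 0) : pvTops board ((i, j) :: rest) = pvTops board rest := by
  simp [pvTops, hv]

lemma pvNZ_cons_zero (board : List (List Int)) (i j : Int) (rest : List (Int × Int))
    (hv : pvCell board i j = 0) : pvNZ board ((i, j) :: rest) = pvNZ board rest := by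
  simp [pvNZ, hv]

lemma pvNZ_cons_nz (board : List (List Int)) (i j : Int) (rest : List (Int × Int))
    (hv : ¬ pvCell board i j = 0) :
    pvNZ board ((i, j) :: rest) = pvCell board i j :: pvNZ board rest := by
  simp [pvNZ, hv]

lemma pvGo_char (board : List (List Int)) (ps : List (Int × Int)) :
    ∀ black before, black ≤ 2 →
      remove_check_go board ps black before =
        (decide (black + (pvZC board ps : Int) ≤ 2) && pvTops board ps
          && pvChain before (pvNZ board ps)) := by
  induction ps with
  | nil =>
    intro black before hb
    simp [remove_check_go, pvZC, pvTops, pvNZ, pvChain, hb]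
  | cons p rest ih =>
    obtain ⟨i, j⟩ := p
    intro black before hb
    by_cases hv : pvCell board i j = 0
    · rw [pvZC_cons_zero board i j rest hv, pvTops_cons_zero board i j rest hv,
         pvNZ_cons_zero board i j rest hv]
      by_cases ht : top_check i j board = true
      · by_cases hc : black + 1 > 2
        · have hL : remove_check_go board ((i, j) :: rest) black before = false := by
            simp [remove_check_go, hv, ht, hc]
          have hd : decide (black + ((pvZC board rest : Int) + 1) ≤ 2) = false := by
            have : (0 : Int) ≤ (pvZC board rest : Int) := by positivity
            simp; omega
          rw [hL]
          push_cast
          rw [hd]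
          simp
        · have hb' : black + 1 ≤ 2 := by omega
          have hL : remove_check_go board ((i, j) :: rest) black before
              = remove_check_go board rest (black + 1) before := by
            simp [remove_check_go, hv, ht, hc]
          rw [hL, ih (black + 1) before hb', ht]
          have hd : decide (black + 1 + (pvZC board rest : Int) ≤ 2)
              = decide (black + ((pvZC board rest : Int) + 1) ≤ 2) := by
            rw [decide_eq_decide]; omega
          push_cast
          rw [hd]
          simp
      · have hL : remove_check_go board ((i, j) :: rest) black before = false := by
          simp [remove_check_go, hv]
          intro h
          exact absurd h ht
        rw [hL]
        simp at ht
        rw [ht]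
        simp
    · rw [pvZC_cons_nz board i j rest hv, pvTops_cons_nz board i j rest hv,
         pvNZ_cons_nz board i j rest hv]
      by_cases ho : (before == -1 || before == pvCell board i j) = true
      · have hob : other_block_check before (pvCell board i j) = false := by
          simp [other_block_check, ho]
        have hL : remove_check_go board ((i, j) :: rest) black before
            = remove_check_go board rest black (pvCell board i j) := by
          simp [remove_check_go, hv, hob]
        rw [hL, ih black (pvCell board i j) hb]
        show _ = (_ && _ && pvChain before (pvCell board i j :: pvNZ board rest))
        rw [show pvChain before (pvCell board i j :: pvNZ board rest)
            = ((before == -1 || before == pvCell board i j)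
               && pvChain (pvCell board i j) (pvNZ board rest)) from rfl, ho]
        simp
      · have hob : other_block_check before (pvCell board i j) = true := by
          simp at ho
          simp [other_block_check, ho.1, ho.2]
        have hL : remove_check_go board ((i, j) :: rest) black before = false := by
          simp [remove_check_go, hv, hob]
        rw [hL]
        rw [show pvChain before (pvCell board i j :: pvNZ board rest)
            = ((before == -1 || before == pvCell board i j)
               && pvChain (pvCell board i j) (pvNZ board rest)) from rfl]
        rw [Bool.eq_false_iff.mpr (fun h => ho h) ]
        simp

lemma pvChain_ne (vs : List Int) : ∀ b : Int, b ≠ -1 → pvChain b vs = vs.all (fun v => v == b) := by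
  induction vs with
  | nil => intro b _; rfl
  | cons v t ih =>
    intro b hb
    by_cases hv : b = v
    · subst hv
      simp [pvChain, List.all_cons, ih b hb]
    · have h1 : (b == -1) = false := by simp [hb]
      have h2 : (b == v) = false := by simp [hv]
      have h3 : (v == b) = false := by simp [Ne.symm hv]
      simp [pvChain, h1, h2, h3]

lemma pvChain_neg1 (vs : List Int) (h : ∀ v ∈ vs, v ≠ -1) :
    pvChain (-1) vs = true ↔ ∀ a ∈ vs, ∀ c ∈ vs, a = c := by
  cases vs with
  | nil => simp [pvChain]
  | cons v t =>
    have hv : v ≠ -1 := h v (by simp)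
    constructor
    · intro hc a ha c hc'
      have : pvChain v t = true := by
        have := hc; simpa [pvChain] using this
      rw [pvChain_ne t v hv] at this
      have hall : ∀ u ∈ t, u = v := by
        intro u hu
        have := List.all_eq_true.mp this u hu
        simpa using this
      have ha' : a = v := by rcases List.mem_cons.mp ha with h | h <;> [exact h; exact hall a h]
      have hc'' : c = v := by rcases List.mem_cons.mp hc' with h | h <;> [exact h; exact hall c h]
      rw [ha', hc'']
    · intro hall
      simp only [pvChain, Bool.and_eq_true]
      refine ⟨by simp, ?_⟩
      rw [pvChain_ne t v hv]
      apply List.all_eq_true.mpr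
      intro u hu
      simpa using hall u (by simp [hu]) v (by simp)

lemma pvRun_some (vs : List Int) : ∀ b : Int,
    pvRun (some b) vs = if vs.all (fun v => v == b) then some (some b) else none := by
  induction vs with
  | nil => intro b; simp [pvRun]
  | cons v t ih =>
    intro b
    by_cases hv : b = v
    · subst hv
      simp [pvRun, List.all_cons, ih]
    · have h2 : (b == v) = false := by simp [hv]
      have h3 : (v == b) = false := by simp [Ne.symm hv]
      simp [pvRun, h2, List.all_cons, h3]

lemma pvRun_none_isSome (vs : List Int) :
    (pvRun none vs).isSome = true ↔ ∀ a ∈ vs, ∀ c ∈ vs, a = c := by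
  cases vs with
  | nil => simp [pvRun]
  | cons v t =>
    have : pvRun none (v :: t) = pvRun (some v) t := rfl
    rw [this, pvRun_some t v]
    by_cases ha : t.all (fun u => u == v) = true
    · simp only [ha, if_true, Option.isSome_some, true_iff]
      intro a hha c hhc
      have hall : ∀ u ∈ t, u = v := by
        intro u hu
        simpa using List.all_eq_true.mp ha u hu
      have h1 : a = v := by rcases List.mem_cons.mp hha with h | h <;> [exact h; exact hall a h]
      have h2 : c = v := by rcases List.mem_cons.mp hhc with h | h <;> [exact h; exact hall c h]
      rw [h1, h2]
    · have ha' : t.all (fun u => u == v) = false := by simpa using ha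
      rw [ha', if_neg Bool.false_ne_true]
      apply iff_of_false (by simp)
      intro hall
      apply ha
      apply List.all_eq_true.mpr
      intro u hu
      simpa using hall u (by simp [hu]) v (by simp)

lemma pvRun_append (l m : List Int) : ∀ v : Option Int,
    pvRun v (l ++ m) = match pvRun v l with | none => none | some v' => pvRun v' m := by
  induction l with
  | nil => intro v; cases v <;> simp [pvRun]
  | cons a t ih =>
    intro v
    cases v with
    | none => simpa [pvRun] using ih (some a)
    | some b =>
      by_cases hb : (b == a) = true
      · simpa [pvRun, hb] using ih (some b)
      · simp [pvRun, hb]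

lemma bcol_char (board : List (List Int)) (y j : Int) (ks : List Int) :
    ∀ (seen : Bool) (black : Int) (value : Option Int),
      bcol board y j ks seen black value =
        if pvCok board y j seen ks then
          match pvRun value (pvCvals board y j ks) with
          | none => none
          | some v' => some (black + (pvCzc board y j ks : Int), v')
        else none := by
  induction ks with
  | nil => intro seen black value; simp [bcol, pvCok, pvCvals, pvCzc, pvRun]
  | cons k ks ih =>
    intro seen black value
    by_cases hy : y ≤ k
    · by_cases hc : pvCell board k j = 0
      · -- region black cell
        have hguard : (y ≤ k ∧ pvCell board k j = 0) := ⟨hy, hc⟩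
        have hcv : pvCvals board y j (k :: ks) = pvCvals board y j ks := by
          simp [pvCvals, hc]
        have hcz : pvCzc board y j (k :: ks) = pvCzc board y j ks + 1 := by
          simp [pvCzc, hy, hc]
        have hcok : pvCok board y j seen (k :: ks)
            = (!seen && pvCok board y j seen ks) := by
          show ((if y ≤ k ∧ pvCell board k j = 0 then !seen else true) && _) = _
          rw [if_pos hguard]
          congr 1
          simp [hc]
        cases seen with
        | true =>
          have hL : bcol board y j (k :: ks) true black value = none := by
            simp [bcol, hy, hc]
          rw [hL, hcok]
          simp
        | false =>
          have hL : bcol board y j (k :: ks) false black value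
              = bcol board y j ks false (black + 1) value := by
            simp [bcol, hy, hc]
          rw [hL, ih false (black + 1) value, hcok, hcv, hcz]
          simp only [Bool.not_false, Bool.true_and]
          by_cases hok : pvCok board y j false ks = true
          · simp only [hok, if_true]
            cases hr : pvRun value (pvCvals board y j ks) with
            | none => rfl
            | some v' =>
              have : black + 1 + (pvCzc board y j ks : Int)
                  = black + ((pvCzc board y j ks + 1 : Nat) : Int) := by push_cast; ring
              rw [this]
          · simp [hok]
      · -- region nonzero cell
        have hguard : ¬ (y ≤ k ∧ pvCell board k j = 0) := by
          intro h; exact hc h.2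
        have hcv : pvCvals board y j (k :: ks)
            = pvCell board k j :: pvCvals board y j ks := by
          simp [pvCvals, hy, hc]
        have hcz : pvCzc board y j (k :: ks) = pvCzc board y j ks := by
          simp [pvCzc, hc]
        have hnz : (pvCell board k j != 0) = true := by simp [hc]
        have hcok : ∀ s : Bool, pvCok board y j s (k :: ks)
            = pvCok board y j true ks := by
          intro s
          show ((if y ≤ k ∧ pvCell board k j = 0 then !s else true) && _) = _
          rw [if_neg hguard]
          simp [hnz]
        cases value with
        | none =>
          have hL : bcol board y j (k :: ks) seen black none
              = bcol board y j ks true black (some (pvCell board k j)) := by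
            simp [bcol, hy, hc, hnz]
          rw [hL, ih true black (some (pvCell board k j)), hcok, hcv, hcz]
          rfl
        | some b =>
          by_cases hbv : (b == pvCell board k j) = true
          · have hL : bcol board y j (k :: ks) seen black (some b)
                = bcol board y j ks true black (some b) := by
              simp [bcol, hy, hc, hnz, hbv]
            rw [hL, ih true black (some b), hcok, hcv, hcz]
            have : pvRun (some b) (pvCell board k j :: pvCvals board y j ks)
                = pvRun (some b) (pvCvals board y j ks) := by
              simp [pvRun, hbv]
            rw [this]
          · have hbv' : (b == pvCell board k j) = false := by
              simpa using hbv
            have hL : bcol board y j (k :: ks) seen black (some b) = none := by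
              simp [bcol, hy, hc, hbv']
            rw [hL, hcv]
            have : pvRun (some b) (pvCell board k j :: pvCvals board y j ks) = none := by
              simp [pvRun, hbv]
            rw [this]
            split <;> rfl
    · -- above-region row: only updates seen
      have hguard : ¬ (y ≤ k ∧ pvCell board k j = 0) := fun h => hy h.1
      have hcv : pvCvals board y j (k :: ks) = pvCvals board y j ks := by
        simp [pvCvals, hy]
      have hcz : pvCzc board y j (k :: ks) = pvCzc board y j ks := by
        simp [pvCzc, hy]
      have hcok : pvCok board y j seen (k :: ks)
          = pvCok board y j (seen || (pvCell board k j != 0)) ks := by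
        show ((if y ≤ k ∧ pvCell board k j = 0 then !seen else true) && _) = _
        rw [if_neg hguard]
        simp
      have hL : bcol board y j (k :: ks) seen black value
          = bcol board y j ks (seen || (pvCell board k j != 0)) black value := by
        simp [bcol, hy]
      rw [hL, ih _ black value, hcok, hcv, hcz]

lemma bcols_char (board : List (List Int)) (y h : Int) (js : List Int) :
    ∀ (black : Int) (value : Option Int),
      bcols board y h js black value =
        if js.all (fun j => pvCok board y j false (PySem.List.pyRange 0 (y + h) 1)) then
          match pvRun value (js.flatMap
              (fun j => pvCvals board y j (PySem.List.pyRange 0 (y + h) 1))) with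
          | none => none
          | some v' => some (black
              + ((js.map (fun j => pvCzc board y j (PySem.List.pyRange 0 (y + h) 1))).sum : Int), v')
        else none := by
  induction js with
  | nil => intro black value; simp [bcols, pvRun]
  | cons j js ih =>
    intro black value
    have hstep : bcols board y h (j :: js) black value
        = match bcol board y j (PySem.List.pyRange 0 (y + h) 1) false black value with
          | none => none
          | some (black', value') => bcols board y h js black' value' := rfl
    rw [hstep, bcol_char]
    by_cases hok : pvCok board y j false (PySem.List.pyRange 0 (y + h) 1) = true
    · simp only [hok, if_true]
      rw [List.flatMap_cons, pvRun_append]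
      cases hr : pvRun value (pvCvals board y j (PySem.List.pyRange 0 (y + h) 1)) with
      | none =>
        dsimp only
        simp only [List.all_cons, hok, Bool.true_and]
        split <;> rfl
      | some v' =>
        dsimp only
        rw [ih]
        simp only [List.all_cons, hok, Bool.true_and]
        by_cases hall : js.all (fun j => pvCok board y j false (PySem.List.pyRange 0 (y + h) 1)) = true
        · simp only [hall, if_true]
          cases hr2 : pvRun v' (js.flatMap
              (fun j => pvCvals board y j (PySem.List.pyRange 0 (y + h) 1))) with
          | none => rfl
          | some v'' =>
            simp only [List.map_cons, List.sum_cons]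
            have harith : black + (pvCzc board y j (PySem.List.pyRange 0 (y + h) 1) : Int)
                + ((js.map (fun j => pvCzc board y j (PySem.List.pyRange 0 (y + h) 1))).sum : Int)
                = black + ((pvCzc board y j (PySem.List.pyRange 0 (y + h) 1)
                    + (js.map (fun j => pvCzc board y j (PySem.List.pyRange 0 (y + h) 1))).sum : Nat) : Int) := by
              push_cast; ring
            rw [harith]
        · simp [hall]
    · have hokf : pvCok board y j false (PySem.List.pyRange 0 (y + h) 1) = false := by
        simpa using hok
      simp [List.all_cons, hokf]

lemma pvCok_range (board : List (List Int)) (y j : Int) :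
    ∀ (m : Nat) (a : Int) (seen : Bool),
      (pvCok board y j seen (PySem.List.pyRange a (a + (m : Int)) 1) = true) ↔
        (∀ k : Int, a ≤ k → k < a + (m : Int) → y ≤ k → pvCell board k j = 0 →
          seen = false ∧ ∀ k' : Int, a ≤ k' → k' < k → pvCell board k' j = 0) := by
  intro m
  induction m with
  | zero =>
    intro a seen
    rw [show a + ((0 : Nat) : Int) = a by simp, PySem.List.pyRange_one_eq_nil (le_refl a)]
    simp only [pvCok, true_iff]
    intro k h1 h2
    omega
  | succ m ih =>
    intro a seen
    have hsplit : a + ((m + 1 : Nat) : Int) = (a + 1) + (m : Int) := by push_cast; ring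
    rw [hsplit, PySem.List.pyRange_one_cons (by omega : a < (a + 1) + (m : Int))]
    have hunf : pvCok board y j seen (a :: PySem.List.pyRange (a + 1) ((a + 1) + (m : Int)) 1)
        = ((if y ≤ a ∧ pvCell board a j = 0 then !seen else true)
            && pvCok board y j (seen || (pvCell board a j != 0))
              (PySem.List.pyRange (a + 1) ((a + 1) + (m : Int)) 1)) := rfl
    rw [hunf, Bool.and_eq_true, ih (a + 1) (seen || (pvCell board a j != 0))]
    constructor
    · rintro ⟨hg, htail⟩ k hk1 hk2 hky hk0
      by_cases hka : k = a
      · subst hka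
        have : y ≤ k ∧ pvCell board k j = 0 := ⟨hky, hk0⟩
        rw [if_pos this] at hg
        refine ⟨by simpa using hg, ?_⟩
        intro k' h1 h2; omega
      · have hk1' : a + 1 ≤ k := by omega
        obtain ⟨hseen', hpref⟩ := htail k hk1' (by omega) hky hk0
        have hseen : seen = false := by
          cases seen <;> simp_all
        have hca : pvCell board a j = 0 := by
          rcases Bool.or_eq_false_iff.mp hseen' with ⟨_, hne⟩
          simpa using hne
        refine ⟨hseen, ?_⟩
        intro k' h1 h2
        by_cases hk'a : k' = a
        · subst hk'a; exact hca
        · exact hpref k' (by omega) h2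
    · intro hall
      constructor
      · by_cases hg : y ≤ a ∧ pvCell board a j = 0
        · rw [if_pos hg]
          obtain ⟨hs, _⟩ := hall a (le_refl a) (by omega) hg.1 hg.2
          simp [hs]
        · rw [if_neg hg]
      · intro k hk1 hk2 hky hk0
        obtain ⟨hs, hpref⟩ := hall k (by omega) (by omega) hky hk0
        have hca : pvCell board a j = 0 := hpref a (le_refl a) (by omega)
        constructor
        · simp [hs, hca]
        · intro k' h1 h2; exact hpref k' (by omega) h2

lemma pvCok_of_no_region (board : List (List Int)) (y j : Int) :
    ∀ (ks : List Int) (seen : Bool), (∀ k ∈ ks, ¬ y ≤ k) → pvCok board y j seen ks = true := by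
  intro ks
  induction ks with
  | nil => intro seen _; rfl
  | cons k t ih =>
    intro seen hk
    have h1 : ¬ (y ≤ k ∧ pvCell board k j = 0) := fun h => hk k (by simp) h.1
    simp only [pvCok, if_neg h1, Bool.true_and]
    exact ih _ (fun k' hk' => hk k' (by simp [hk']))

lemma pv_sum_map_add (l : List Int) (f g : Int → Nat) :
    (l.map (fun a => f a + g a)).sum = (l.map f).sum + (l.map g).sum := by
  induction l with
  | nil => simp
  | cons a t ih => simp [ih]; omega

lemma pv_sum_ite (l : List Int) (p : Int → Bool) :
    (l.map (fun b => if p b then 1 else 0)).sum = (l.filter p).length := by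
  induction l with
  | nil => simp
  | cons a t ih =>
    simp only [List.map_cons, List.sum_cons, List.filter_cons]
    split
    · simp [ih]; omega
    · simp [ih]

lemma pv_sum_comm (p : Int → Int → Bool) (l₁ l₂ : List Int) :
    (l₁.map (fun a => (l₂.filter (p a)).length)).sum
      = (l₂.map (fun b => (l₁.filter (fun a => p a b)).length)).sum := by
  induction l₁ with
  | nil => simp
  | cons a t ih =>
    have hR : ∀ b, ((a :: t).filter (fun a' => p a' b)).length
        = (if p a b then 1 else 0) + (t.filter (fun a' => p a' b)).length := by
      intro b
      simp only [List.filter_cons]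
      split
      · simp; omega
      · simp
    calc (l₂.filter (p a)).length + (t.map (fun a => (l₂.filter (p a)).length)).sum
        = (l₂.map (fun b => if p a b then 1 else 0)).sum
            + (l₂.map (fun b => (t.filter (fun a' => p a' b)).length)).sum := by
          rw [pv_sum_ite, ih]
      _ = (l₂.map (fun b => (if p a b then 1 else 0)
            + (t.filter (fun a' => p a' b)).length)).sum := by
          rw [pv_sum_map_add]
      _ = (l₂.map (fun b => ((a :: t).filter (fun a' => p a' b)).length)).sum := by
          apply congrArg
          apply List.map_congr_left
          intro b _
          exact (hR b).symm

-- ===== VERDICT (by name: the statement is the Claim_ definition above) =====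
theorem remove_check_spec : Claim_equal_remove_check := by
  intro n board y x height weight _ hpre
  unfold Spec_remove_check
  unfold Pre_remove_check at hpre
  by_cases hg : (y + height > n || x + weight > n) = true
  · simp only [remove_check, remove_check_alt, hg, if_true]
  · have hgf : (y + height > n || x + weight > n) = false := by simpa using hg
    have hbnd : y + height ≤ n ∧ x + weight ≤ n := by
      simp at hg; constructor <;> omega
    set rows := PySem.List.pyRange y (y + height) 1 with hrows
    set cols := PySem.List.pyRange x (x + weight) 1 with hcols
    set ks0 := PySem.List.pyRange 0 (y + height) 1 with hks0
    set ps := rows.flatMap (fun i => cols.map (fun j => (i, j))) with hps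
    have hA : remove_check n board y x height weight
        = (decide ((0:Int) + (pvZC board ps : Int) ≤ 2) && pvTops board ps
            && pvChain (-1) (pvNZ board ps)) := by
      rw [remove_check, if_neg (by simpa using hg)]
      exact pvGo_char board ps 0 (-1) (by norm_num)
    have hB0 : remove_check_alt n board y x height weight
        = match bcols board y height cols 0 none with
          | none => false
          | some (black, _) => decide (black ≤ 2) := by
      rw [remove_check_alt, if_neg (by simpa using hg)]
    by_cases hw : 0 < weight
    · have hpre' := hpre ⟨hbnd.1, hbnd.2, hw⟩
      by_cases hyh : 0 < y + height
      · obtain ⟨hx0, hblen, hrlen⟩ := hpre'.2 hyh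
        by_cases hh : 0 < height
        · -- main case
          obtain ⟨hy0, -, hne⟩ := hpre'.1 hh
          -- per-column reductions of the B-side abstractions to region rows
          have hksplit : ks0 = PySem.List.pyRange 0 y 1 ++ rows := by
            rw [hks0, hrows]
            exact PySem.List.pyRange_one_append 0 y (y + height) (by omega) (by omega)
          have hlow : ∀ k ∈ PySem.List.pyRange 0 y 1, ¬ y ≤ k := by
            intro k hk
            have := (PySem.List.mem_pyRange_one).mp hk
            omega
          have hhigh : ∀ k ∈ rows, y ≤ k := by
            intro k hk
            have := (PySem.List.mem_pyRange_one).mp hk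
            omega
          have hcz : ∀ jj : Int, pvCzc board y jj ks0
              = (rows.filter (fun k => pvCell board k jj == 0)).length := by
            intro jj
            rw [pvCzc, hksplit, List.filter_append]
            have h1 : (PySem.List.pyRange 0 y 1).filter
                (fun k => decide (y ≤ k) && (pvCell board k jj == 0)) = [] := by
              apply List.filter_eq_nil_iff.mpr
              intro k hk
              simp [hlow k hk]
            have h2 : rows.filter (fun k => decide (y ≤ k) && (pvCell board k jj == 0))
                = rows.filter (fun k => pvCell board k jj == 0) := by
              apply List.filter_congr
              intro k hk
              simp [hhigh k hk]
            rw [h1, h2, List.nil_append]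
          have hcv : ∀ jj : Int, pvCvals board y jj ks0
              = (rows.filter (fun k => pvCell board k jj != 0)).map
                  (fun k => pvCell board k jj) := by
            intro jj
            rw [pvCvals, hksplit, List.filter_append]
            have h1 : (PySem.List.pyRange 0 y 1).filter
                (fun k => decide (y ≤ k) && (pvCell board k jj != 0)) = [] := by
              apply List.filter_eq_nil_iff.mpr
              intro k hk
              simp [hlow k hk]
            have h2 : rows.filter (fun k => decide (y ≤ k) && (pvCell board k jj != 0))
                = rows.filter (fun k => pvCell board k jj != 0) := by
              apply List.filter_congr
              intro k hk
              simp [hhigh k hk]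
            rw [h1, h2, List.nil_append]
          -- count bridge
          have hcount : pvZC board ps
              = (cols.map (fun j => pvCzc board y j ks0)).sum := by
            have hzc : pvZC board ps
                = (rows.map (fun i => (cols.filter (fun j => pvCell board i j == 0)).length)).sum := by
              rw [pvZC, hps, List.filter_flatMap, List.length_flatMap]
              congr 1
              apply List.map_congr_left
              intro i _
              rw [List.filter_map]
              simp [Function.comp_def]
            rw [hzc, pv_sum_comm (fun i j => pvCell board i j == 0) rows cols]
            apply congrArg
            apply List.map_congr_left
            intro j _
            exact (hcz j).symm
          -- tops bridge
          have hmemrows : ∀ k : Int, k ∈ rows ↔ y ≤ k ∧ k < y + height := by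
            intro k; rw [hrows]; exact PySem.List.mem_pyRange_one
          have hmemcols : ∀ k : Int, k ∈ cols ↔ x ≤ k ∧ k < x + weight := by
            intro k; rw [hcols]; exact PySem.List.mem_pyRange_one
          have hTops : pvTops board ps
              = cols.all (fun j => pvCok board y j false ks0) := by
            rw [Bool.eq_iff_iff]
            have hcast : (0 : Int) + (((y + height).toNat : Nat) : Int) = y + height := by omega
            constructor
            · intro ht
              apply List.all_eq_true.mpr
              intro j hj
              rw [hks0, show (y + height) = 0 + (((y + height).toNat : Nat) : Int) from hcast.symm]
              rw [pvCok_range board y j ((y + height).toNat) 0 false]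
              intro k hk0 hkend hky hkc
              refine ⟨rfl, ?_⟩
              intro k' h1 h2
              have hkrows : (k, j) ∈ ps := by
                rw [hps]
                refine List.mem_flatMap.mpr ⟨k, ?_, ?_⟩
                · rw [hmemrows]; constructor
                  · exact hky
                  · omega
                · exact List.mem_map.mpr ⟨j, hj, rfl⟩
              have := List.all_eq_true.mp ht (k, j)
                (List.mem_filter.mpr ⟨hkrows, by simpa using hkc⟩)
              have := List.all_eq_true.mp this k'
                (PySem.List.mem_pyRange_one.mpr ⟨h1, h2⟩)
              simpa using this
            · intro hc
              apply List.all_eq_true.mpr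
              intro p hp
              obtain ⟨hpp, hpz⟩ := List.mem_filter.mp hp
              rw [hps] at hpp
              obtain ⟨i, hi', hmap⟩ := List.mem_flatMap.mp hpp
              obtain ⟨j, hj', hpair⟩ := List.mem_map.mp hmap
              subst hpair
              have hcok := List.all_eq_true.mp hc j hj'
              rw [hks0, show (y + height) = 0 + (((y + height).toNat : Nat) : Int) from hcast.symm,
                pvCok_range board y j ((y + height).toNat) 0 false] at hcok
              have hiy := (hmemrows i).mp hi'
              obtain ⟨-, hpref⟩ := hcok i (by omega) (by omega) hiy.1 (by simpa using hpz)
              apply List.all_eq_true.mpr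
              intro k hk
              have := PySem.List.mem_pyRange_one.mp hk
              simpa using hpref k this.1 this.2
          -- chain bridge
          have hmemNZ : ∀ v : Int, v ∈ pvNZ board ps ↔
              ∃ i, (y ≤ i ∧ i < y + height) ∧ ∃ j ∈ cols, pvCell board i j ≠ 0 ∧ pvCell board i j = v := by
            intro v
            rw [pvNZ]
            constructor
            · intro hv
              obtain ⟨p, hpf, hpv⟩ := List.mem_map.mp hv
              obtain ⟨hpp, hpnz⟩ := List.mem_filter.mp hpf
              rw [hps] at hpp
              obtain ⟨i, hi, hmap⟩ := List.mem_flatMap.mp hpp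
              obtain ⟨j, hj, hpair⟩ := List.mem_map.mp hmap
              subst hpair
              exact ⟨i, (hmemrows i).mp hi, j, hj, by simpa using hpnz, hpv⟩
            · rintro ⟨i, hi, j, hj, hnz0, hval⟩
              apply List.mem_map.mpr
              refine ⟨(i, j), List.mem_filter.mpr ⟨?_, by simpa using hnz0⟩, hval⟩
              rw [hps]
              exact List.mem_flatMap.mpr ⟨i, (hmemrows i).mpr hi, List.mem_map.mpr ⟨j, hj, rfl⟩⟩
          have hmemTV : ∀ v : Int,
              v ∈ cols.flatMap (fun j => pvCvals board y j ks0) ↔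
              ∃ i, (y ≤ i ∧ i < y + height) ∧ ∃ j ∈ cols, pvCell board i j ≠ 0 ∧ pvCell board i j = v := by
            intro v
            constructor
            · intro hv
              obtain ⟨j, hj, hvj⟩ := List.mem_flatMap.mp hv
              rw [hcv j] at hvj
              obtain ⟨k, hkf, hkv⟩ := List.mem_map.mp hvj
              obtain ⟨hkr, hknz⟩ := List.mem_filter.mp hkf
              exact ⟨k, (hmemrows k).mp hkr, j, hj, by simpa using hknz, hkv⟩
            · rintro ⟨i, hi, j, hj, hnz0, hval⟩
              apply List.mem_flatMap.mpr
              refine ⟨j, hj, ?_⟩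
              rw [hcv j]
              exact List.mem_map.mpr ⟨i, List.mem_filter.mpr
                ⟨(hmemrows i).mpr hi, by simpa using hnz0⟩, hval⟩
          have hnoneg : ∀ v ∈ pvNZ board ps, v ≠ -1 := by
            intro v hv
            obtain ⟨i, hi, j, hj, -, hval⟩ := (hmemNZ v).mp hv
            rw [← hval]
            exact hne i ((hmemrows i).mpr hi) j hj
          have hChain : pvChain (-1) (pvNZ board ps)
              = (pvRun none (cols.flatMap (fun j => pvCvals board y j ks0))).isSome := by
            rw [Bool.eq_iff_iff, pvChain_neg1 _ hnoneg, pvRun_none_isSome]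
            constructor
            · intro hp a ha c hc
              exact hp a ((hmemNZ a).mpr ((hmemTV a).mp ha)) c ((hmemNZ c).mpr ((hmemTV c).mp hc))
            · intro hp a ha c hc
              exact hp a ((hmemTV a).mpr ((hmemNZ a).mp ha)) c ((hmemTV c).mpr ((hmemNZ c).mp hc))
          -- assemble
          rw [hA, hB0, bcols_char, ← hks0]
          rw [hTops, hChain, hcount]
          cases hak : cols.all (fun j => pvCok board y j false ks0) with
          | false => simp
          | true =>
            simp only [if_true]
            cases hr : pvRun none (cols.flatMap (fun j => pvCvals board y j ks0)) with
            | none => simp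
            | some v' => simp
        · -- height ≤ 0 but some rows above get scanned: region empty, A is true
          have hrowsnil : rows = [] := by
            rw [hrows]; exact PySem.List.pyRange_one_eq_nil (by omega)
          have hpsnil : ps = [] := by rw [hps, hrowsnil]; rfl
          have hnoreg : ∀ k ∈ ks0, ¬ y ≤ k := by
            intro k hk
            have := PySem.List.mem_pyRange_one.mp (hks0 ▸ hk)
            omega
          have hcoktriv : ∀ j : Int, pvCok board y j false ks0 = true := by
            intro j; exact pvCok_of_no_region board y j ks0 false hnoreg
          have hcvnil : ∀ j : Int, pvCvals board y j ks0 = [] := by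
            intro j
            rw [pvCvals]
            rw [List.filter_eq_nil_iff.mpr (fun k hk => by simp [hnoreg k hk])]
            rfl
          have hcznil : ∀ j : Int, pvCzc board y j ks0 = 0 := by
            intro j
            rw [pvCzc]
            rw [List.filter_eq_nil_iff.mpr (fun k hk => by simp [hnoreg k hk])]
            rfl
          rw [hA, hB0, bcols_char, ← hks0, hpsnil]
          have h1 : cols.all (fun j => pvCok board y j false ks0) = true := by
            apply List.all_eq_true.mpr; intro j _; exact hcoktriv j
          have h2 : cols.flatMap (fun j => pvCvals board y j ks0) = [] := by
            apply List.flatMap_eq_nil_iff.mpr; intro j _; exact hcvnil j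
          have h3 : (cols.map (fun j => pvCzc board y j ks0)).sum = 0 := by
            rw [List.map_congr_left (fun j _ => hcznil j)]
            simp
          rw [h1, h2, h3]
          simp [pvZC, pvTops, pvNZ, pvChain, pvRun]
      · -- y + height ≤ 0: B scans nothing; region empty (else Pre_ would force 0 ≤ y)
        have hh : ¬ 0 < height := by
          intro hh
          obtain ⟨hy0, -, -⟩ := hpre'.1 hh
          omega
        have hrowsnil : rows = [] := by
          rw [hrows]; exact PySem.List.pyRange_one_eq_nil (by omega)
        have hpsnil : ps = [] := by rw [hps, hrowsnil]; rfl
        have hksnil : ks0 = [] := by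
          rw [hks0]; exact PySem.List.pyRange_one_eq_nil (by omega)
        rw [hA, hB0, bcols_char, ← hks0, hpsnil, hksnil]
        have h1 : cols.all (fun j => pvCok board y j false []) = true := by
          apply List.all_eq_true.mpr; intro j _; rfl
        have h2 : cols.flatMap (fun j => pvCvals board y j []) = [] := by
          apply List.flatMap_eq_nil_iff.mpr; intro j _; rfl
        have h3 : (cols.map (fun j => pvCzc board y j [])).sum = 0 := by
          rw [show (fun j => pvCzc board y j []) = (fun _ : Int => (0 : Nat)) from rfl]
          simp
        rw [h1, h2, h3]
        simp [pvZC, pvTops, pvNZ, pvChain, pvRun]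
    · -- weight ≤ 0: no columns at all; both sides are true
      have hcolsnil : cols = [] := by
        rw [hcols]; exact PySem.List.pyRange_one_eq_nil (by omega)
      have hpsnil : ps = [] := by
        rw [hps, hcolsnil]
        simp
      rw [hA, hB0, hpsnil, hcolsnil]
      simp [pvZC, pvTops, pvNZ, pvChain, bcols]
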